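-- pv_equiv track=rewrite | github.com/miliar/Code_Jam_Webscraper | solutions_python/Problem_200/1272.py | _back_propagate_sub
-- ===== SOURCE A (Python) =====
-- def _back_propagate_sub(nlist):
--     nlist[-1] -= 1
--     if len(nlist) == 1:
--         return nlist
--
--     if nlist[-2] <= nlist[-1] and nlist[-1] >= 0:
--         return nlist
--     else:
--         return _back_propagate_sub(nlist[:-1]) + [9]
-- ===== SOURCE B (Python) =====
-- def _back_propagate_sub(nlist):
--     i = len(nlist) - 1
--     v = nlist[i] - 1
--     while i > 0 and not (nlist[i - 1] <= v and v >= 0):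
--         i -= 1
--         v = nlist[i] - 1
--     return nlist[:i] + [v] + [9] * (len(nlist) - 1 - i)
-- ===== Notes on version B (the rewrite author's own statement) =====
-- stated objective: faster
-- what changed: replaced the recursion that slices off the last element and appends a nine at every borrow step by a single right-to-left index scan that finds the stopping point and then assembles prefix + decremented digit + trailing nines in one go
import Mathlib
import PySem

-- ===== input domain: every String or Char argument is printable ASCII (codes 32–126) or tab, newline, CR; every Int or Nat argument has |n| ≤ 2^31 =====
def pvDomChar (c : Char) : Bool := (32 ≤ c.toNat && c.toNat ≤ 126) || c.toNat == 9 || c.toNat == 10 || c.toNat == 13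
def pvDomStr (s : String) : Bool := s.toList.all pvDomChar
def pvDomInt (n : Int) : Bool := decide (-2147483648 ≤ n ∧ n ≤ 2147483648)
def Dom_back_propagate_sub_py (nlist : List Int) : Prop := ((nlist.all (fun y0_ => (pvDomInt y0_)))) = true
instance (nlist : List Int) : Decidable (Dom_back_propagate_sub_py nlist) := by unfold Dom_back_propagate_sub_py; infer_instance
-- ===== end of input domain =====

-- B replaces A's O(n^2) recursion-with-slicing by one right-to-left index scan that finds the
-- borrow stopping point and assembles the answer directly (objective: faster, asymptotic).
-- Equivalence is about the RETURN value only: Python A mutates nlist[-1] in place, B does not.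

-- ===== PORT A =====
-- nlist[-1] -= 1 : in-place update of the last slot = dropLast ++ [last - 1];
-- pyGetD's default 0 is unreachable under Pre_ (nlist ≠ []), where Python raises IndexError.
def back_propagate_sub_py (nlist : List Int) : List Int :=
  let m := nlist.dropLast ++ [PySem.List.pyGetD nlist (-1) 0 - 1]
  if h : m.length = 1 then m
  else if PySem.List.pyGetD m (-2) 0 ≤ PySem.List.pyGetD m (-1) 0 ∧ PySem.List.pyGetD m (-1) 0 ≥ 0 then m
  else back_propagate_sub_py (PySem.List.slice m none (some (-1))) ++ [9]
termination_by nlist.length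
decreasing_by
  simp only [PySem.List.slice_to_neg_one, List.length_dropLast, List.length_append,
    List.length_singleton, m] at h ⊢
  omega

-- ===== PORT B =====
-- the while loop of Source B: scan i from len-1 downwards while the borrow must propagate
def bps_find (nlist : List Int) : Nat → Nat
  | 0 => 0
  | i + 1 =>
    if nlist.getD i 0 ≤ nlist.getD (i + 1) 0 - 1 ∧ nlist.getD (i + 1) 0 - 1 ≥ 0 then i + 1
    else bps_find nlist i

def back_propagate_sub_py_alt (nlist : List Int) : List Int :=
  let i := bps_find nlist (nlist.length - 1)
  nlist.take i ++ [nlist.getD i 0 - 1] ++ List.replicate (nlist.length - 1 - i) 9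

-- ===== PRECONDITION & SPEC =====
-- Pre_ excludes only the empty list, on which Python A raises IndexError (nlist[-1]).
def Pre_back_propagate_sub_py (nlist : List Int) : Prop := nlist ≠ []
instance (nlist : List Int) : Decidable (Pre_back_propagate_sub_py nlist) := by
  unfold Pre_back_propagate_sub_py; infer_instance
def pvWitness_back_propagate_sub_py : List Int := [1, 0, 0]

def Spec_back_propagate_sub_py (nlist : List Int) (out : List Int) : Prop := out = back_propagate_sub_py_alt nlist
instance (nlist : List Int) (out : List Int) : Decidable (Spec_back_propagate_sub_py nlist out) := by unfold Spec_back_propagate_sub_py; infer_instance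

-- ===== CLAIM (what is proved, stated in full; the proofs are below) =====
def Claim_equal_back_propagate_sub_py : Prop := ∀ (nlist : List Int), Dom_back_propagate_sub_py nlist → Pre_back_propagate_sub_py nlist → Spec_back_propagate_sub_py nlist (back_propagate_sub_py nlist)

-- ===== LEMMAS AND PROOFS =====

theorem bps_find_le (nlist : List Int) (k : Nat) : bps_find nlist k ≤ k := by
  induction k with
  | zero => simp [bps_find]
  | succ i ih => unfold bps_find; split <;> omega

theorem bps_find_append (xs : List Int) (a : Int) (k : Nat) (hk : k < xs.length) :
    bps_find (xs ++ [a]) k = bps_find xs k := by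
  induction k with
  | zero => simp [bps_find]
  | succ i ih =>
    unfold bps_find
    rw [List.getD_append _ _ _ _ (by omega), List.getD_append _ _ _ _ (by omega),
      ih (by omega)]

theorem main_eq (nlist : List Int) (h : nlist ≠ []) :
    back_propagate_sub_py nlist = back_propagate_sub_py_alt nlist := by
  induction nlist using List.reverseRecOn with
  | nil => exact absurd rfl h
  | append_singleton xs a ih =>
    rw [back_propagate_sub_py.eq_def]
    simp only [List.dropLast_concat, PySem.List.pyGetD_neg_one_append_singleton]
    by_cases hxs : xs = []
    · subst hxs
      simp [back_propagate_sub_py_alt, bps_find]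
    · have hlen : 0 < xs.length := List.length_pos_iff.mpr hxs
      rw [dif_neg (by simp; omega)]
      have h2 : PySem.List.pyGetD (xs ++ [a - 1]) (-2) 0 = xs.getD (xs.length - 1) 0 := by
        rw [PySem.List.pyGetD_neg_ofNat (xs ++ [a - 1]) 2 0 (by omega) (by simp; omega)]
        rw [List.getD_eq_getElem xs 0 (by omega)]
        simp only [List.length_append, List.length_singleton]
        rw [List.getElem_append_left (by omega)]
        congr 1
      rw [h2]
      -- B side: unfold alt at xs ++ [a]
      have hfind : bps_find (xs ++ [a]) ((xs ++ [a]).length - 1) =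
          if xs.getD (xs.length - 1) 0 ≤ a - 1 ∧ a - 1 ≥ 0 then xs.length
          else bps_find xs (xs.length - 1) := by
        have hl : (xs ++ [a]).length - 1 = (xs.length - 1) + 1 := by simp; omega
        rw [hl, bps_find]
        have e1 : (xs ++ [a]).getD (xs.length - 1) 0 = xs.getD (xs.length - 1) 0 :=
          List.getD_append _ _ _ _ (by omega)
        have e2 : (xs ++ [a]).getD (xs.length - 1 + 1) 0 = a := by
          have h3 : xs.length - 1 + 1 = xs.length := by omega
          rw [h3]; simp
        rw [e1, e2]
        split
        · omega
        · exact bps_find_append xs a (xs.length - 1) (by omega)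
      split
      · -- condition holds: A returns m = xs ++ [a-1]
        rename_i hc
        unfold back_propagate_sub_py_alt
        rw [hfind, if_pos hc]
        simp
      · -- condition fails: A recurses
        rename_i hc
        rw [PySem.List.slice_to_neg_one, List.dropLast_concat, ih hxs]
        unfold back_propagate_sub_py_alt
        rw [hfind, if_neg hc]
        have hile : bps_find xs (xs.length - 1) ≤ xs.length - 1 := bps_find_le xs (xs.length - 1)
        have e1 : (xs ++ [a]).take (bps_find xs (xs.length - 1)) = xs.take (bps_find xs (xs.length - 1)) :=
          List.take_append_of_le_length (by omega)
        have e2 : (xs ++ [a]).getD (bps_find xs (xs.length - 1)) 0 = xs.getD (bps_find xs (xs.length - 1)) 0 :=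
          List.getD_append _ _ _ _ (by omega)
        have e3 : (xs ++ [a]).length - 1 - bps_find xs (xs.length - 1) = (xs.length - 1 - bps_find xs (xs.length - 1)) + 1 := by
          simp; omega
        simp only [e1, e2, e3, List.replicate_succ']
        simp

-- ===== VERDICT (by name: the statement is the Claim_ definition above) =====
theorem back_propagate_sub_py_spec : Claim_equal_back_propagate_sub_py := by
  intro nlist _ hpre
  exact main_eq nlist hpre
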